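-- pv_equiv track=rewrite | github.com/Oyeon/CMU-LLMSystem | llmsys_s25_hw4/pipeline/pipe.py | _clock_cycles
-- ===== SOURCE A (Python) =====
-- from typing import Any, Iterable, Iterator, List, Optional, Tuple
--
-- def _clock_cycles(num_batches: int, num_partitions: int) -> Iterable[List[Tuple[int, int]]]:
--     """
--     Generate the schedule for each clock cycle.
--     For clock k from 0..(num_batches+num_partitions-2),
--     we collect all (i,j) s.t. i+j=k, 0<=i<num_batches, 0<=j<num_partitions.
--     """
--     for k in range(num_batches + num_partitions - 1):
--         step = []
--         for j in range(num_partitions):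
--             i = k - j
--             if 0 <= i < num_batches:
--                 step.append((i, j))
--         yield step
-- ===== SOURCE B (Python) =====
-- from typing import Any, Iterable, Iterator, List, Optional, Tuple
--
-- def _clock_cycles(num_batches: int, num_partitions: int) -> Iterable[List[Tuple[int, int]]]:
--     """Bucket-scatter schedule: fill diagonal buckets once, then emit them."""
--     buckets = [[] for _ in range(num_batches + num_partitions - 1)]
--     if num_batches > 0:  # otherwise there is nothing to scatter
--         for j in range(num_partitions):
--             for i in range(num_batches):
--                 buckets[i + j].append((i, j))
--     yield from buckets
-- ===== Notes on version B (the rewrite author's own statement) =====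
-- stated objective: alternative
-- what changed: Replaces the per-clock scan over all partitions (filtering j with i=k-j in range) by a single scatter pass: pre-allocate one bucket per diagonal and append each (i,j) to bucket[i+j], then emit the buckets in order.
import Mathlib
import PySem

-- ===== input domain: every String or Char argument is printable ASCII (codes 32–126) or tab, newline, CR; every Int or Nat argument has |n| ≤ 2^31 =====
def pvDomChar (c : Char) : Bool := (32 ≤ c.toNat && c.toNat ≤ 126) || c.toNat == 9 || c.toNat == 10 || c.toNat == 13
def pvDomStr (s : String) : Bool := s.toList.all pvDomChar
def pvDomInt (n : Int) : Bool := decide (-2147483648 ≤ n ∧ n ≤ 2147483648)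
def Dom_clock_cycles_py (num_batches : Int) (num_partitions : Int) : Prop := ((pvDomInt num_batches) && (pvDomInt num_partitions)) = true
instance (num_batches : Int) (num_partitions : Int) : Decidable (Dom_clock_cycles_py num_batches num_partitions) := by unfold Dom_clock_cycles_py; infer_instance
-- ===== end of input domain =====

-- B replaces A's per-clock scan over all partitions by a single scatter pass into per-diagonal
-- buckets (same outputs; an alternative decomposition, not claimed faster).
-- A is a generator; both ports return the list of yielded steps in order.

-- ===== PORT A =====
-- for k in range(nb + np - 1): step = []; for j in range(np): i = k - j; if 0 <= i < nb: step.append((i, j)); yield step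
def clock_cycles_py (num_batches : Int) (num_partitions : Int) : List (List (Int × Int)) :=
  (PySem.List.pyRange 0 (num_batches + num_partitions - 1) 1).foldl
    (fun acc k =>
      acc ++ [(PySem.List.pyRange 0 num_partitions 1).foldl
        (fun step j =>
          if 0 ≤ k - j ∧ k - j < num_batches then step ++ [(k - j, j)] else step) []])
    []

-- ===== PORT B =====
-- buckets = [[] for _ in range(nb + np - 1)]; for j in range(np): for i in range(nb): buckets[i+j].append((i,j)); yield from buckets
-- buckets[i+j].append(…) is List.modify at index (i+j).toNat (i, j ≥ 0 inside the loops, so toNat is exact)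
def clock_cycles_py_alt (num_batches : Int) (num_partitions : Int) : List (List (Int × Int)) :=
  let buckets : List (List (Int × Int)) :=
    (PySem.List.pyRange 0 (num_batches + num_partitions - 1) 1).map (fun _ => [])
  if 0 < num_batches then
    (PySem.List.pyRange 0 num_partitions 1).foldl
      (fun bs j =>
        (PySem.List.pyRange 0 num_batches 1).foldl
          (fun bs i => bs.modify (i + j).toNat (fun l => l ++ [(i, j)])) bs)
      buckets
  else buckets

-- ===== PRECONDITION & SPEC =====
def Spec_clock_cycles_py (num_batches : Int) (num_partitions : Int) (out : List (List (Int × Int))) : Prop := out = clock_cycles_py_alt num_batches num_partitions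
instance (num_batches : Int) (num_partitions : Int) (out : List (List (Int × Int))) : Decidable (Spec_clock_cycles_py num_batches num_partitions out) := by unfold Spec_clock_cycles_py; infer_instance

-- ===== CLAIM (what is proved, stated in full; the proofs are below) =====
def Claim_equal_clock_cycles_py : Prop := ∀ (num_batches : Int) (num_partitions : Int), Dom_clock_cycles_py num_batches num_partitions → Spec_clock_cycles_py num_batches num_partitions (clock_cycles_py num_batches num_partitions)

-- ===== LEMMAS AND PROOFS =====

-- one inner loop (fixed j): each modify appends once; per-index characterisation
theorem pv_inner_getElem? (j : Int) (is : List Int) (bs : List (List (Int × Int))) (t : Nat) :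
    (is.foldl (fun bs i => bs.modify (i + j).toNat (fun l => l ++ [(i, j)])) bs)[t]?
      = (bs[t]?).map (fun l => l ++ (is.filter (fun i => (i + j).toNat == t)).map (fun i => (i, j))) := by
  induction is generalizing bs with
  | nil => cases h : bs[t]? <;> simp [h]
  | cons i is ih =>
    simp only [List.foldl_cons, List.filter_cons]
    rw [ih, List.getElem?_modify]
    by_cases h : (i + j).toNat = t
    · cases bs[t]? <;> simp [h]
    · have hb : ((i + j).toNat == t) = false := by simp [h]
      cases bs[t]? <;> simp [h, hb]

-- the outer loop: contributions of successive j concatenate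
theorem pv_outer_getElem? (n : Int) (js : List Int) (bs : List (List (Int × Int))) (t : Nat) :
    (js.foldl (fun bs j =>
        (PySem.List.pyRange 0 n 1).foldl (fun bs i => bs.modify (i + j).toNat (fun l => l ++ [(i, j)])) bs) bs)[t]?
      = (bs[t]?).map (fun l => l ++ js.flatMap (fun j =>
          ((PySem.List.pyRange 0 n 1).filter (fun i => (i + j).toNat == t)).map (fun i => (i, j)))) := by
  induction js generalizing bs with
  | nil => cases h : bs[t]? <;> simp [h]
  | cons j js ih =>
    simp only [List.foldl_cons, List.flatMap_cons]
    rw [ih, pv_inner_getElem?]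
    cases bs[t]? <;> simp

-- for a fixed bucket t and j ≥ 0, the filtered i-range has at most the single element t - j
theorem pv_filter_single (n j : Int) (t : Nat) (hj : 0 ≤ j) :
    ((PySem.List.pyRange 0 n 1).filter (fun i => (i + j).toNat == t)).map (fun i => (i, j))
      = if 0 ≤ (t : Int) - j ∧ (t : Int) - j < n then [((t : Int) - j, j)] else [] := by
  have hc : (PySem.List.pyRange 0 n 1).filter (fun i => (i + j).toNat == t)
      = (PySem.List.pyRange 0 n 1).filter (fun i => i == (t : Int) - j) := by
    apply List.filter_congr
    intro i hi
    have h0 : 0 ≤ i ∧ i < n := by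
      have := (PySem.List.mem_pyRange_one).1 hi; omega
    by_cases h : i = (t : Int) - j
    · simp [h]
    · have : (i + j).toNat ≠ t := by omega
      simp [h, this]
  rw [hc, List.filter_beq, List.Nodup.count (PySem.List.nodup_pyRange_one 0 n)]
  by_cases h : ((t : Int) - j) ∈ PySem.List.pyRange 0 n 1
  · have hb := (PySem.List.mem_pyRange_one).1 h
    simp [h]
    omega
  · have hb : ¬ (0 ≤ (t : Int) - j ∧ (t : Int) - j < n) := by
      intro hx; exact h ((PySem.List.mem_pyRange_one).2 ⟨hx.1, hx.2⟩)
    simp [h]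
    omega

-- collapse the flatMap over nonnegative j into A's filter-map form
theorem pv_flatMap_eq (n : Int) (t : Nat) (js : List Int) (hjs : ∀ j ∈ js, 0 ≤ j) :
    js.flatMap (fun j =>
        ((PySem.List.pyRange 0 n 1).filter (fun i => (i + j).toNat == t)).map (fun i => (i, j)))
      = (js.filter (fun j => decide (0 ≤ (t : Int) - j ∧ (t : Int) - j < n))).map
          (fun j => ((t : Int) - j, j)) := by
  induction js with
  | nil => simp
  | cons j js ih =>
    simp only [List.flatMap_cons, List.filter_cons]
    rw [pv_filter_single n j t (hjs j (by simp)), ih (fun x hx => hjs x (by simp [hx]))]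
    by_cases h : 0 ≤ (t : Int) - j ∧ (t : Int) - j < n
    · rw [if_pos h, if_pos (by simpa using h)]
      simp
    · rw [if_neg h, if_neg (by simpa using h)]
      simp

-- A equals the unguarded scatter fold (for every n, m)
theorem pv_main (n m : Int) :
    clock_cycles_py n m
      = (PySem.List.pyRange 0 m 1).foldl
          (fun bs j =>
            (PySem.List.pyRange 0 n 1).foldl
              (fun bs i => bs.modify (i + j).toNat (fun l => l ++ [(i, j)])) bs)
          ((PySem.List.pyRange 0 (n + m - 1) 1).map (fun _ => [])) := by
  unfold clock_cycles_py
  apply List.ext_getElem?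
  intro t
  -- A side: outer fold is a map, inner fold is a filter-map
  rw [PySem.List.foldl_append_singleton_eq_map]
  rw [pv_outer_getElem?]
  have hA : ∀ k : Int,
      (PySem.List.pyRange 0 m 1).foldl
        (fun step j => if 0 ≤ k - j ∧ k - j < n then step ++ [(k - j, j)] else step) []
      = ((PySem.List.pyRange 0 m 1).filter (fun j => decide (0 ≤ k - j ∧ k - j < n))).map
          (fun j => (k - j, j)) := by
    intro k
    have := PySem.List.foldl_append_if (fun j => decide (0 ≤ k - j ∧ k - j < n))
      (fun j => (k - j, j)) (PySem.List.pyRange 0 m 1) []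
    simpa using this
  simp only [List.nil_append, List.getElem?_map, PySem.List.getElem?_pyRange_one]
  by_cases h : t < (n + m - 1 - 0).toNat
  · rw [if_pos h]
    simp only [Option.map_some]
    rw [show (0 : Int) + (t : Int) = (t : Int) by ring, hA,
      pv_flatMap_eq n t (PySem.List.pyRange 0 m 1)
        (fun j hj => ((PySem.List.mem_pyRange_one).1 hj).1)]
    simp
  · rw [if_neg h]
    simp

-- when n ≤ 0 the scatter fold does nothing
theorem pv_fold_const {β : Type} (js : List Int) (bs : β) :
    js.foldl (fun bs _ => bs) bs = bs := by
  induction js with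
  | nil => rfl
  | cons j js ih => simp [ih]

-- ===== VERDICT (by name: the statement is the Claim_ definition above) =====
theorem clock_cycles_py_spec : Claim_equal_clock_cycles_py := by
  intro n m _
  unfold Spec_clock_cycles_py clock_cycles_py_alt
  by_cases hn : 0 < n
  · rw [if_pos hn]
    exact pv_main n m
  · rw [if_neg hn, pv_main n m, PySem.List.pyRange_one_eq_nil (by omega : n ≤ 0)]
    simp only [List.foldl_nil]
    exact pv_fold_const _ _
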